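-- pv_equiv track=rewrite | github.com/InternalCakeEngine/fpga_flapjack | tools/assem/fj_as.py | strip_completely
-- ===== SOURCE A (Python) =====
-- def strip_completely( line ):
--     line2 = line.strip().split('#')[0]
--     res = ""
--     was_ws = False
--     for c in line2:
--         if c.isspace():
--             if was_ws:
--                 continue
--             else:
--                 res += " "
--                 was_ws = True
--         else:
--             res += c
--             was_ws = False
--     return res
-- ===== SOURCE B (Python) =====
-- def strip_completely(line):
--     line2 = line.strip().split('#')[0]
--     pieces = []
--     i = 0
--     n = len(line2)
--     while i < n:
--         j = i
--         if line2[i].isspace():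
--             while j < n and line2[j].isspace():
--                 j += 1
--             pieces.append(' ')
--         else:
--             while j < n and not line2[j].isspace():
--                 j += 1
--             pieces.append(line2[i:j])
--         i = j
--     return ''.join(pieces)
-- ===== Notes on version B (the rewrite author's own statement) =====
-- stated objective: alternative
-- what changed: Replaces A's character-at-a-time loop with a was_ws flag and incremental string concatenation by a run-based scanner that finds each maximal whitespace or non-whitespace run, emits one piece per run (a single space or the run verbatim), and joins the pieces at the end.
import Mathlib
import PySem

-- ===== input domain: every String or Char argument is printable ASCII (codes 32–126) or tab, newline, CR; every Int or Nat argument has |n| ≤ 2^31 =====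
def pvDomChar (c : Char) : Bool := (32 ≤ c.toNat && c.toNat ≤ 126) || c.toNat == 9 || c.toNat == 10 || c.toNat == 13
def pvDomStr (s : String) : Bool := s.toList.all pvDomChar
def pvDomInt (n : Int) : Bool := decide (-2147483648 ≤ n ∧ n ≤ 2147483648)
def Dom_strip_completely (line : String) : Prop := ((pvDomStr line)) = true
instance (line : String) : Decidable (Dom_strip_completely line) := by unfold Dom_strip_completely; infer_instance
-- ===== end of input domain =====

-- B replaces A's char-by-char loop (was_ws flag, string +=) with a run-based scanner
-- emitting one piece per maximal run, joined at the end; objective: alternative.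

-- ===== PORT A =====
-- the 'for c in line2' loop of A: state (res, was_ws), one character at a time
def stripALoop : List Char → List Char → Bool → List Char
  | [], res, _ => res
  | c :: cs, res, was_ws =>
    if PySem.Chars.isspace c then
      if was_ws then stripALoop cs res was_ws
      else stripALoop cs (res ++ [' ']) true
    else stripALoop cs (res ++ [c]) false

def strip_completely (line : String) : String :=
  let line2 := PySem.List.pyGetD (PySem.Chars.splitOn (PySem.Chars.strip line.toList) ['#']) 0 []
  String.ofList (stripALoop line2 [] false)

-- ===== PORT B =====
-- Source B's outer while loop: each step consumes one maximal run (the inner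
-- 'while j < n and …' scans are takeWhile/dropWhile) and appends one piece
def stripBRuns : List Char → List (List Char)
  | [] => []
  | c :: cs =>
    if PySem.Chars.isspace c then
      [' '] :: stripBRuns (cs.dropWhile PySem.Chars.isspace)
    else
      (c :: cs.takeWhile (fun d => !PySem.Chars.isspace d)) ::
        stripBRuns (cs.dropWhile (fun d => !PySem.Chars.isspace d))
termination_by cs => cs.length
decreasing_by
  · exact Nat.lt_succ_of_le (List.length_dropWhile_le _ _)
  · exact Nat.lt_succ_of_le (List.length_dropWhile_le _ _)

def strip_completely_alt (line : String) : String :=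
  let line2 := PySem.List.pyGetD (PySem.Chars.splitOn (PySem.Chars.strip line.toList) ['#']) 0 []
  String.ofList (PySem.Chars.join [] (stripBRuns line2))

-- ===== PRECONDITION & SPEC =====
def Spec_strip_completely (line : String) (out : String) : Prop := out = strip_completely_alt line
instance (line : String) (out : String) : Decidable (Spec_strip_completely line out) := by unfold Spec_strip_completely; infer_instance

-- ===== CLAIM (what is proved, stated in full; the proofs are below) =====
def Claim_equal_strip_completely : Prop := ∀ (line : String), Dom_strip_completely line → Spec_strip_completely line (strip_completely line)

-- ===== LEMMAS AND PROOFS =====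

-- ''.join of the pieces is their concatenation
lemma join_nil_eq_flatten (l : List (List Char)) : PySem.Chars.join [] l = l.flatten := by
  induction l with
  | nil => rfl
  | cons a l ih =>
    cases l with
    | nil => simp [PySem.Chars.join_singleton]
    | cons b l' => simp [PySem.Chars.join_cons_cons, ih]

-- splitting off the leading non-space run does not change the concatenation of B's runs
lemma flatten_runs_split (cs : List Char) :
    (stripBRuns cs).flatten =
      cs.takeWhile (fun d => !PySem.Chars.isspace d) ++
        (stripBRuns (cs.dropWhile (fun d => !PySem.Chars.isspace d))).flatten := by
  cases cs with
  | nil => simp [stripBRuns]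
  | cons c cs =>
    by_cases h : PySem.Chars.isspace c
    · simp [stripBRuns, h]
    · simp [stripBRuns, h]

-- A's loop computes the concatenation of B's runs (leading spaces skipped when was_ws)
lemma aLoop_eq_runs (cs : List Char) : ∀ (res : List Char) (ws : Bool),
    stripALoop cs res ws =
      res ++ (stripBRuns (if ws then cs.dropWhile PySem.Chars.isspace else cs)).flatten := by
  induction cs with
  | nil => intro res ws; cases ws <;> simp [stripALoop, stripBRuns]
  | cons c cs ih =>
    intro res ws
    by_cases h : PySem.Chars.isspace c
    · cases ws with
      | true =>
        simp only [stripALoop, h, if_true, List.dropWhile_cons]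
        rw [ih res true]
        simp
      | false =>
        simp only [stripALoop, h, if_true, if_neg Bool.false_ne_true]
        rw [ih (res ++ [' ']) true]
        simp [stripBRuns, h]
    · have hrun : (stripBRuns (c :: cs)).flatten = c :: (stripBRuns cs).flatten := by
        simp only [stripBRuns, if_neg h, List.flatten_cons, List.cons_append]
        rw [flatten_runs_split cs]
      simp only [stripALoop, h, if_false, Bool.false_eq_true]
      rw [ih (res ++ [c]) false]
      cases ws <;> simp [h, hrun]

-- ===== VERDICT (by name: the statement is the Claim_ definition above) =====
theorem strip_completely_spec : Claim_equal_strip_completely := by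
  intro line _
  unfold Spec_strip_completely strip_completely strip_completely_alt
  simp only [join_nil_eq_flatten, aLoop_eq_runs]
  simp
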